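-- pv_equiv track=rewrite | github.com/Wattyyy/LeetCode | submissions/maximum-length-of-a-concatenated-string-with-unique-characters/solution.py | count
-- ===== SOURCE A (Python) =====
-- from typing import List, Tuple
--
-- def count(order: Tuple[int, ...], arr: List[str]) -> int:
--     checked = set()
--     for i in order:
--         for char in arr[i]:
--             if char in checked:
--                 return 0
--             else:
--                 checked.add(char)
--     return len(checked)
-- ===== SOURCE B (Python) =====
-- def count(order, arr):
--     chars = sorted(c for i in order for c in arr[i])
--     for x, y in zip(chars, chars[1:]):
--         if x == y:
--             return 0
--     return len(chars)
-- ===== Notes on version B (the rewrite author's own statement) =====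
-- stated objective: alternative
-- what changed: B sorts the concatenated characters and detects duplicates by scanning adjacent pairs of the sorted list, replacing A's incremental hash-set membership test.
-- outside the precondition, e.g. on count((0, 1), ['aa']): A returns 0, B raises IndexError
import Mathlib
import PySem

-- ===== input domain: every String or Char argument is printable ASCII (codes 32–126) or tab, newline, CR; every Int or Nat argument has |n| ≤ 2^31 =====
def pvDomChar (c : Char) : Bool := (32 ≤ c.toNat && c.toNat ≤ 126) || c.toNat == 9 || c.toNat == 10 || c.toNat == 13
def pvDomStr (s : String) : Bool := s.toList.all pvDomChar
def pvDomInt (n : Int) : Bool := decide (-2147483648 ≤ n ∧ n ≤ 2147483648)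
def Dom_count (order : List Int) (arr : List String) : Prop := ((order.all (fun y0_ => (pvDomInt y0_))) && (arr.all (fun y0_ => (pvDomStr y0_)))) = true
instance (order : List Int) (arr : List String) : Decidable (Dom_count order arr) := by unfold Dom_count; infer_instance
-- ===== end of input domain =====

-- B sorts the concatenated characters and finds duplicates on adjacent pairs, instead of A's incremental set with early return (objective: alternative).

-- ===== PORT A =====
-- inner 'for char in arr[i]': none = early 'return 0', some = updated checked set
def countInner (checked : PySem.Set Char) : List Char → Option (PySem.Set Char)
  | [] => some checked
  | c :: cs =>
    if PySem.Set.contains checked c then none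
    else countInner (PySem.Set.add checked c) cs

-- outer 'for i in order'
def countLoop (arr : List String) (checked : PySem.Set Char) : List Int → Int
  | [] => (checked.length : Int)
  | i :: rest =>
    match PySem.List.pyGet? arr i with
    | none => 0    -- IndexError in Python; excluded by Pre_count
    | some s =>
      match countInner checked s.toList with
      | none => 0
      | some checked' => countLoop arr checked' rest

def count (order : List Int) (arr : List String) : Int :=
  countLoop arr PySem.Set.empty order

-- ===== PORT B =====
-- 'for x, y in zip(chars, chars[1:]): if x == y: return 0'
def adjDup : List Char → Bool
  | x :: y :: rest => x == y || adjDup (y :: rest)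
  | _ => false

def count_alt (order : List Int) (arr : List String) : Int :=
  let chars : List Char :=
    PySem.List.sorted ((order.map (fun i => ((PySem.List.pyGet? arr i).getD "").toList)).flatten)
      (fun c => c) false
  if adjDup chars then 0 else (chars.length : Int)

-- ===== PRECONDITION & SPEC =====
-- Pre_ excludes inputs where some index in order is out of range for arr: there Python A
-- raises IndexError, except when a duplicate character appears before the bad index, where A
-- returns 0 early while B (which builds the whole concatenation first) raises.
def Pre_count (order : List Int) (arr : List String) : Prop :=
  ∀ i ∈ order, PySem.Raise.InRange arr.length i
instance (order : List Int) (arr : List String) : Decidable (Pre_count order arr) := by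
  unfold Pre_count; infer_instance

def pvWitness_count : List Int × List String := ([0, 1, -1], ["ab", "cd"])

def Spec_count (order : List Int) (arr : List String) (out : Int) : Prop := out = count_alt order arr
instance (order : List Int) (arr : List String) (out : Int) : Decidable (Spec_count order arr out) := by unfold Spec_count; infer_instance

-- ===== CLAIM (what is proved, stated in full; the proofs are below) =====
def Claim_equal_count : Prop := ∀ (order : List Int) (arr : List String), Dom_count order arr → Pre_count order arr → Spec_count order arr (count order arr)

-- ===== LEMMAS AND PROOFS =====

-- chars of the concatenation of arr[i] for i in rest
def concChars (arr : List String) (rest : List Int) : List Char :=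
  (rest.map (fun i => ((PySem.List.pyGet? arr i).getD "").toList)).flatten

theorem countInner_eq (cs : List Char) (checked : List Char) (h : checked.Nodup) :
    countInner checked cs =
      if (checked ++ cs).Nodup then some (checked ++ cs) else none := by
  induction cs generalizing checked with
  | nil => simp [countInner, h]
  | cons c cs ih =>
    by_cases hc : c ∈ checked
    · have hnd : ¬ (checked ++ c :: cs).Nodup := fun hnd =>
        absurd (List.disjoint_of_nodup_append hnd hc) (by simp)
      simp [countInner, PySem.Set.contains, hc, hnd]
    · have hadd : PySem.Set.add checked c = checked ++ [c] := by
        simp [PySem.Set.add, PySem.Set.contains, hc]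
      have hnd' : (checked ++ [c]).Nodup := by
        simp [List.nodup_append, h]
        exact fun a ha he => hc (he ▸ ha)
      have hcf : PySem.Set.contains checked c = false := by
        simp [PySem.Set.contains, hc]
      rw [countInner, hcf]
      simp only [Bool.false_eq_true, if_false, hadd, ih _ hnd', List.append_assoc]
      rfl

theorem countLoop_eq (arr : List String) (rest : List Int) (checked : List Char)
    (h : checked.Nodup) (hpre : ∀ i ∈ rest, PySem.Raise.InRange arr.length i) :
    countLoop arr checked rest =
      if (checked ++ concChars arr rest).Nodup
      then ((checked ++ concChars arr rest).length : Int) else 0 := by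
  induction rest generalizing checked with
  | nil => simp [countLoop, concChars, h]
  | cons i rest ih =>
    have hin : PySem.Raise.InRange arr.length i := hpre i (by simp)
    obtain ⟨s, hs⟩ : ∃ s, PySem.List.pyGet? arr i = some s := by
      rcases hget : PySem.List.pyGet? arr i with _ | s
      · exact absurd ((PySem.List.pyGet?_eq_none_iff arr i).mp hget) (by simp [hin])
      · exact ⟨s, rfl⟩
    have hconc : concChars arr (i :: rest) = s.toList ++ concChars arr rest := by
      simp [concChars, hs]
    have hstep : countLoop arr checked (i :: rest) =
        match countInner checked s.toList with
        | none => 0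
        | some checked' => countLoop arr checked' rest := by
      rw [countLoop, hs]
    rw [hstep, countInner_eq _ _ h, hconc]
    by_cases hnd : (checked ++ s.toList).Nodup
    · rw [if_pos hnd]
      simp only []
      rw [ih _ hnd (fun j hj => hpre j (by simp [hj])), ← List.append_assoc]
    · rw [if_neg hnd]
      simp only []
      rw [if_neg (fun hbig => hnd ((List.append_assoc checked s.toList _ ▸ hbig).sublist
        (List.sublist_append_left _ _)))]

-- on a ≤-sorted list, no adjacent duplicate ↔ no duplicate at all
theorem adjDup_eq_false_iff_nodup (l : List Char) (hs : l.Pairwise (· ≤ ·)) :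
    adjDup l = false ↔ l.Nodup := by
  induction l with
  | nil => simp [adjDup]
  | cons x t ih =>
    cases t with
    | nil => simp [adjDup]
    | cons y r =>
      have hxy : x ≤ y := (List.pairwise_cons.mp hs).1 y (by simp)
      have htail : (y :: r).Pairwise (· ≤ ·) := (List.pairwise_cons.mp hs).2
      by_cases hxe : x = y
      · subst hxe
        constructor
        · intro hfalse; simp [adjDup] at hfalse
        · intro hnd; exact absurd (by simp : x ∈ x :: r) (List.nodup_cons.mp hnd).1
      · have hnx : x ∉ y :: r := by
          intro hmem
          rcases List.mem_cons.mp hmem with h | h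
          · exact hxe h
          · have hyz : y ≤ x := (List.pairwise_cons.mp htail).1 x h
            exact hxe (le_antisymm hxy hyz)
        have hstep : adjDup (x :: y :: r) = adjDup (y :: r) := by
          simp [adjDup, hxe]
        rw [hstep, ih htail]
        simp [List.nodup_cons, hnx]

-- ===== VERDICT (by name: the statement is the Claim_ definition above) =====
theorem count_spec : Claim_equal_count := by
  intro order arr _ hpre
  unfold Spec_count count count_alt
  show countLoop arr ([] : List Char) order = _
  rw [countLoop_eq arr order [] List.nodup_nil hpre]
  simp only [List.nil_append]
  set conc := concChars arr order with hconc
  show (if conc.Nodup then (conc.length : Int) else 0) =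
    (if adjDup (PySem.List.sorted conc (fun c => c) false) then 0
     else ((PySem.List.sorted conc (fun c => c) false).length : Int))
  have hperm : (PySem.List.sorted conc (fun c => c) false).Perm conc :=
    PySem.List.sorted_perm conc (fun c => c) false
  have hpair : (PySem.List.sorted conc (fun c => c) false).Pairwise (· ≤ ·) :=
    PySem.List.sorted_pairwise conc (fun c => c)
  have hiff := adjDup_eq_false_iff_nodup _ hpair
  by_cases hnd : conc.Nodup
  · have : adjDup (PySem.List.sorted conc (fun c => c) false) = false :=
      hiff.mpr (hperm.nodup_iff.mpr hnd)
    rw [if_pos hnd, this]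
    simp [hperm.length_eq]
  · have : adjDup (PySem.List.sorted conc (fun c => c) false) ≠ false := by
      intro hf; exact hnd (hperm.nodup_iff.mp (hiff.mp hf))
    rw [if_neg hnd, if_pos (by simpa using this)]
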